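-- pv_equiv track=rewrite | github.com/catvasily/eegfhabrainage | preprocessing/individual_func.py | select_chans
-- ===== SOURCE A (Python) =====
-- def select_chans(ch_list, target_list, belong = True):
--     """ From the input channel list `ch_list` select channels that belong to the `target list`.
--     The string comparison is performed case insensitive, but original case is
--     preserved in the returned list.
--
--     Args:
--         ch_list (list of str): input channel list
--         target_list (list of str): a target channel list
--         belong (bool): `True` (default) if request is to find channels that belong to the target list,
--             `False` if one wants channels that do NOT belong to the target list
--
--     Returns:
--         selected_channels, flags
--         selected_channels (list of str): a list of channels from the input list
--             that belong to the `target list`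
--         flags (list of bool): list of flags indicating if elements of `ch_list`
--             belong / not belong to the `target_list`; `len(flags)` equals to `len(ch_list)`
--     """
--
--     target_upper  = [s.upper() for s in target_list]
--
--     selected = []
--     flags = []
--     yes = lambda x: belong if x.upper() in target_upper else (not belong)
--
--     for item in ch_list:
--         if yes(item):
--             selected.append(item)
--             flags.append(True)
--         else:
--             flags.append(False)
--
--     return selected, flags
-- ===== SOURCE B (Python) =====
-- def select_chans(ch_list, target_list, belong=True):
--     """Index-set re-implementation: first compute the set of indices whose
--     channel matches the target set (independently of `belong`), then apply
--     `belong` as a set operation on indices (complement when belong is False),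
--     and finally read both outputs off the kept-index set."""
--     tset = {s.upper() for s in target_list}
--     hit = {i for i, x in enumerate(ch_list) if x.upper() in tset}
--     keep = hit if belong else set(range(len(ch_list))) - hit
--     flags = [i in keep for i in range(len(ch_list))]
--     selected = [x for i, x in enumerate(ch_list) if i in keep]
--     return selected, flags
-- ===== Notes on version B (the rewrite author's own statement) =====
-- stated objective: faster
-- what changed: A fuses everything in one loop testing uppercase list membership per item; B instead computes a belong-independent set of matching indices, applies belong as a complement on that index set, and derives flags and selected from the kept-index set in separate passes.
import Mathlib
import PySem

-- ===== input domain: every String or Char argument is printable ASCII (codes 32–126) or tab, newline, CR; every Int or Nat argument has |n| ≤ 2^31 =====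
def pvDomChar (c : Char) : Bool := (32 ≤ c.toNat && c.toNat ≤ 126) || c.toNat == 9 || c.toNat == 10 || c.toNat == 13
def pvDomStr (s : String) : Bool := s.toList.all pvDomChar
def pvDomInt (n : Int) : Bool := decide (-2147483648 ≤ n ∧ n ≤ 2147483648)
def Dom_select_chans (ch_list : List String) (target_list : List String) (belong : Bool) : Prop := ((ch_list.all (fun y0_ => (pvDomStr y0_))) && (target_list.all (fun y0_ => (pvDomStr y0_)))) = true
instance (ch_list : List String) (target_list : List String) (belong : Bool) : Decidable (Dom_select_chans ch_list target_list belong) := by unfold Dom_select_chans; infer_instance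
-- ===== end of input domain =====

-- B computes the belong-independent set of matching indices, applies `belong` as a complement on that index set, and reads flags and selected off the kept-index set; mechanism: set lookups instead of a per-item list scan.
-- ===== PORT A =====
def select_chans (ch_list : List String) (target_list : List String) (belong : Bool) : List String × List Bool :=
  let target_upper := target_list.map PySem.Str.upper
  let yes := fun (x : String) => if target_upper.contains (PySem.Str.upper x) then belong else !belong
  let st := ch_list.foldl (fun (st : List String × List Bool) item =>
    if yes item then (st.1 ++ [item], st.2 ++ [true]) else (st.1, st.2 ++ [false])) ([], [])
  (st.1, st.2)

-- ===== PORT B =====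
def select_chans_alt (ch_list : List String) (target_list : List String) (belong : Bool) : List String × List Bool :=
  let tset : PySem.Set String := PySem.Set.ofList (target_list.map PySem.Str.upper)
  let hit : PySem.Set Int := PySem.Set.ofList
    (((PySem.List.enumerate ch_list 0).filter (fun p => PySem.Set.contains tset (PySem.Str.upper p.2))).map (fun p => p.1))
  let keep : PySem.Set Int :=
    if belong then hit
    else PySem.Set.diff (PySem.Set.ofList (PySem.List.pyRange 0 (PySem.List.len ch_list))) hit
  let flags := (PySem.List.pyRange 0 (PySem.List.len ch_list)).map (fun i => PySem.Set.contains keep i)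
  let selected := ((PySem.List.enumerate ch_list 0).filter (fun p => PySem.Set.contains keep p.1)).map (fun p => p.2)
  (selected, flags)

-- ===== PRECONDITION & SPEC =====
def Spec_select_chans (ch_list : List String) (target_list : List String) (belong : Bool) (out : List String × List Bool) : Prop := out = select_chans_alt ch_list target_list belong
instance (ch_list : List String) (target_list : List String) (belong : Bool) (out : List String × List Bool) : Decidable (Spec_select_chans ch_list target_list belong out) := by unfold Spec_select_chans; infer_instance

-- ===== CLAIM (what is proved, stated in full; the proofs are below) =====
def Claim_equal_select_chans : Prop := ∀ (ch_list : List String) (target_list : List String) (belong : Bool), Dom_select_chans ch_list target_list belong → Spec_select_chans ch_list target_list belong (select_chans ch_list target_list belong)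

-- ===== LEMMAS AND PROOFS =====

-- per-item flag agreement: A's if-then-else equals (Set membership == belong)
lemma flag_eq (target_list : List String) (belong : Bool) (x : String) :
    (if (target_list.map PySem.Str.upper).contains (PySem.Str.upper x) then belong else !belong)
      = ((PySem.Set.contains (PySem.Set.ofList (target_list.map PySem.Str.upper)) (PySem.Str.upper x)) == belong) := by
  rcases h : (target_list.map PySem.Str.upper).contains (PySem.Str.upper x) with _ | _
  · have h' : PySem.Str.upper x ∉ target_list.map PySem.Str.upper := by simpa using h
    simp [PySem.Set.contains, PySem.Set.mem_ofList, h']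
  · have h' : PySem.Str.upper x ∈ target_list.map PySem.Str.upper := by simpa using h
    simp [PySem.Set.contains, PySem.Set.mem_ofList, h']

-- loop invariant: A's foldl appends exactly the filter / map of the remaining items
lemma fold_inv (ch : List String) (f : String → Bool) (sel : List String) (fl : List Bool) :
    ch.foldl (fun (st : List String × List Bool) item =>
        if f item then (st.1 ++ [item], st.2 ++ [true]) else (st.1, st.2 ++ [false])) (sel, fl)
      = (sel ++ ch.filter f, fl ++ ch.map f) := by
  induction ch generalizing sel fl with
  | nil => simp
  | cons x xs ih =>
    rcases hx : f x with _ | _ <;> simp [hx, ih]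

-- the hit-index set of B contains exactly the in-range indices whose channel matches
lemma hit_contains (ch : List String) (P : String → Bool) (k : Nat) (hk : k < ch.length) :
    PySem.Set.contains
      (PySem.Set.ofList (((PySem.List.enumerate ch 0).filter (fun p => P p.2)).map (fun p => p.1))) (k : Int)
      = P ch[k] := by
  rw [Bool.eq_iff_iff, PySem.Set.contains_iff, PySem.Set.mem_ofList]
  constructor
  · intro h
    obtain ⟨q, hq, hfst⟩ := List.mem_map.mp h
    obtain ⟨hmem, hP⟩ := List.mem_filter.mp hq
    obtain ⟨j, hj, rfl⟩ := (PySem.List.mem_enumerate_iff ch 0 q).mp hmem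
    simp only [zero_add] at hfst
    have : j = k := by exact_mod_cast hfst
    subst this
    simpa using hP
  · intro hP
    refine List.mem_map.mpr ⟨((k : Int), ch[k]), List.mem_filter.mpr ⟨?_, by simpa using hP⟩, rfl⟩
    exact (PySem.List.mem_enumerate_iff ch 0 _).mpr ⟨k, hk, by simp⟩

-- the kept-index set of B decides exactly (match == belong) at each in-range index
lemma keep_contains (ch : List String) (P : String → Bool) (belong : Bool) (k : Nat) (hk : k < ch.length) :
    PySem.Set.contains
      (if belong then
        PySem.Set.ofList (((PySem.List.enumerate ch 0).filter (fun p => P p.2)).map (fun p => p.1))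
       else PySem.Set.diff (PySem.Set.ofList (PySem.List.pyRange 0 (PySem.List.len ch)))
              (PySem.Set.ofList (((PySem.List.enumerate ch 0).filter (fun p => P p.2)).map (fun p => p.1))))
      (k : Int)
      = (P ch[k] == belong) := by
  have hhit := hit_contains ch P k hk
  cases belong with
  | true => simpa using hhit
  | false =>
    simp only [Bool.false_eq_true, if_false]
    have hmemrange : (k : Int) ∈ PySem.Set.ofList (PySem.List.pyRange 0 (PySem.List.len ch)) := by
      rw [PySem.Set.mem_ofList, PySem.List.mem_pyRange_one]
      refine ⟨Int.natCast_nonneg k, ?_⟩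
      simp only [PySem.List.len_eq]
      exact_mod_cast hk
    rcases hP : P ch[k] with _ | _
    · rw [hP] at hhit
      have hnot : (k : Int) ∉ PySem.Set.ofList (((PySem.List.enumerate ch 0).filter (fun p => P p.2)).map (fun p => p.1)) := by
        intro hmem
        have := PySem.Set.contains_iff _ _ |>.mpr hmem
        rw [hhit] at this
        exact Bool.false_ne_true this
      have : (k : Int) ∈ PySem.Set.diff (PySem.Set.ofList (PySem.List.pyRange 0 (PySem.List.len ch)))
          (PySem.Set.ofList (((PySem.List.enumerate ch 0).filter (fun p => P p.2)).map (fun p => p.1))) :=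
        (PySem.Set.mem_diff _ _ _).mpr ⟨hmemrange, hnot⟩
      simpa using (PySem.Set.contains_iff _ _).mpr this
    · rw [hP] at hhit
      have hmem : (k : Int) ∈ PySem.Set.ofList (((PySem.List.enumerate ch 0).filter (fun p => P p.2)).map (fun p => p.1)) :=
        (PySem.Set.contains_iff _ _).mp hhit
      have hnd : (k : Int) ∉ PySem.Set.diff (PySem.Set.ofList (PySem.List.pyRange 0 (PySem.List.len ch)))
          (PySem.Set.ofList (((PySem.List.enumerate ch 0).filter (fun p => P p.2)).map (fun p => p.1))) := by
        intro h
        exact ((PySem.Set.mem_diff _ _ _).mp h).2 hmem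
      have : PySem.Set.contains (PySem.Set.diff (PySem.Set.ofList (PySem.List.pyRange 0 (PySem.List.len ch)))
          (PySem.Set.ofList (((PySem.List.enumerate ch 0).filter (fun p => P p.2)).map (fun p => p.1)))) (k : Int) ≠ true :=
        fun h => hnd ((PySem.Set.contains_iff _ _).mp h)
      simpa using Bool.eq_false_iff.mpr this

-- B's filter over enumerate projected to the items is a plain filter of the list
lemma enum_filter_map (ch : List String) (f : String → Bool) (s : Int) :
    ((PySem.List.enumerate ch s).filter (fun p => f p.2)).map (fun p => p.2) = ch.filter f := by
  induction ch generalizing s with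
  | nil => simp [PySem.List.enumerate_nil]
  | cons x xs ih =>
    rw [PySem.List.enumerate_cons]
    rcases hx : f x with _ | _ <;> simp [hx, ih]

-- mapping the index column through a function that agrees with g on each (index, item) pair gives map g
lemma enum_map_fst_map (ch : List String) (g : String → Bool) (kc : Int → Bool) (s : Int)
    (h : ∀ p ∈ PySem.List.enumerate ch s, kc p.1 = g p.2) :
    ((PySem.List.enumerate ch s).map (fun p => p.1)).map kc = ch.map g := by
  induction ch generalizing s with
  | nil => simp [PySem.List.enumerate_nil]
  | cons x xs ih =>
    rw [PySem.List.enumerate_cons]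
    simp only [List.map_cons]
    have hx : kc s = g x := h (s, x) (by rw [PySem.List.enumerate_cons]; simp)
    rw [hx, ih (s + 1) (fun p hp => h p (by rw [PySem.List.enumerate_cons]; exact List.mem_cons_of_mem _ hp))]

-- same, phrased on B's range of indices
lemma pyRange_map_eq (ch : List String) (g : String → Bool) (kc : Int → Bool)
    (h : ∀ p ∈ PySem.List.enumerate ch 0, kc p.1 = g p.2) :
    (PySem.List.pyRange 0 (PySem.List.len ch)).map kc = ch.map g := by
  rw [show PySem.List.pyRange 0 (PySem.List.len ch) = (PySem.List.enumerate ch 0).map (fun p => p.1) by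
        rw [PySem.List.map_fst_enumerate]; simp [PySem.List.len_eq]]
  exact enum_map_fst_map ch g kc 0 h

-- ===== VERDICT (by name: the statement is the Claim_ definition above) =====
theorem select_chans_spec : Claim_equal_select_chans := by
  intro ch target belong _
  unfold Spec_select_chans
  -- the common per-item predicate
  have hA : select_chans ch target belong
      = (ch.filter (fun x => PySem.Set.contains (PySem.Set.ofList (target.map PySem.Str.upper)) (PySem.Str.upper x) == belong),
         ch.map (fun x => PySem.Set.contains (PySem.Set.ofList (target.map PySem.Str.upper)) (PySem.Str.upper x) == belong)) := by
    simp only [select_chans]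
    rw [fold_inv ch (fun x => if (target.map PySem.Str.upper).contains (PySem.Str.upper x) then belong else !belong) [] []]
    simp only [List.nil_append]
    exact Prod.ext (List.filter_congr (fun x _ => flag_eq target belong x))
      (List.map_congr_left (fun x _ => flag_eq target belong x))
  have hkc : ∀ p ∈ PySem.List.enumerate ch 0,
      PySem.Set.contains
        (if belong then
          PySem.Set.ofList (((PySem.List.enumerate ch 0).filter
            (fun p => PySem.Set.contains (PySem.Set.ofList (target.map PySem.Str.upper)) (PySem.Str.upper p.2))).map (fun p => p.1))
         else PySem.Set.diff (PySem.Set.ofList (PySem.List.pyRange 0 (PySem.List.len ch)))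
            (PySem.Set.ofList (((PySem.List.enumerate ch 0).filter
              (fun p => PySem.Set.contains (PySem.Set.ofList (target.map PySem.Str.upper)) (PySem.Str.upper p.2))).map (fun p => p.1))))
        p.1
      = (PySem.Set.contains (PySem.Set.ofList (target.map PySem.Str.upper)) (PySem.Str.upper p.2) == belong) := by
    intro p hp
    obtain ⟨k, hk, rfl⟩ := (PySem.List.mem_enumerate_iff ch 0 p).mp hp
    simpa using keep_contains ch
      (fun x => PySem.Set.contains (PySem.Set.ofList (target.map PySem.Str.upper)) (PySem.Str.upper x)) belong k hk
  have hB : select_chans_alt ch target belong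
      = (ch.filter (fun x => PySem.Set.contains (PySem.Set.ofList (target.map PySem.Str.upper)) (PySem.Str.upper x) == belong),
         ch.map (fun x => PySem.Set.contains (PySem.Set.ofList (target.map PySem.Str.upper)) (PySem.Str.upper x) == belong)) := by
    simp only [select_chans_alt]
    refine Prod.ext ?_ ?_
    · exact (congrArg (List.map (fun p => p.2)) (List.filter_congr hkc)).trans
        (enum_filter_map ch (fun x => PySem.Set.contains (PySem.Set.ofList (target.map PySem.Str.upper)) (PySem.Str.upper x) == belong) 0)
    · exact pyRange_map_eq ch
        (fun x => PySem.Set.contains (PySem.Set.ofList (target.map PySem.Str.upper)) (PySem.Str.upper x) == belong)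
        _ hkc
  rw [hA, hB]
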